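-- pv_equiv track=rewrite | github.com/omniviser/hexDAG | hexai/app/application/services/schema_filtering_service.py | filter_by_query
-- ===== SOURCE A (Python) =====
-- from typing import Any
--
-- def filter_by_query(
--
--     schemas: dict[str, dict[str, Any]],
--     query: str,
-- ) -> list[str]:
--     """Filter schema based on query keywords.
--
--     Args
--     ----
--     schemas: Dictionary of table schemas
--     query: User query string
--
--     Returns
--     -------
--     List of relevant table names
--     """
--     if not query:
--         return list(schemas.keys())
--
--     query_lower = query.lower()
--     relevant_tables = []
--
--     for table, schema in schemas.items():
--         # Check table name
--         if table.lower() in query_lower: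
--             relevant_tables.append(table)
--         else:
--             # Check column names
--             columns = schema.get("columns", {})
--             if any(col.lower() in query_lower for col in columns.keys()):
--                 relevant_tables.append(table)
--
--     return relevant_tables if relevant_tables else list(schemas.keys())
-- ===== SOURCE B (Python) =====
-- def filter_by_query(schemas, query):
--     """Single scan of the query: collect every substring of the query whose
--     length matches some name, via a hash set of all lowered names; then keep
--     tables whose name set intersects the matched set."""
--     if not query:
--         return list(schemas.keys())
--
--     q = query.lower()
--     per_table = [
--         (table, [table.lower()] + [col.lower() for col in schema.get("columns", {})])
--         for table, schema in schemas.items()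
--     ]
--     name_set = {n for _, names in per_table for n in names}
--     lengths = {len(n) for n in name_set}
--
--     matched = set()
--     for i in range(len(q)):
--         for length in lengths:
--             sub = q[i:i + length]
--             if sub in name_set:
--                 matched.add(sub)
--
--     relevant = [table for table, names in per_table if any(n in matched for n in names)]
--     return relevant if relevant else list(schemas.keys())
-- ===== Notes on version B (the rewrite author's own statement) =====
-- stated objective: faster
-- what changed: Instead of running a substring search of the query for every table and column name separately, B builds a hash set of all lowered names plus the set of their distinct lengths, scans the query once probing each position with each distinct name length to collect the names that occur, and then keeps the tables one of whose names was hit.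
import Mathlib
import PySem

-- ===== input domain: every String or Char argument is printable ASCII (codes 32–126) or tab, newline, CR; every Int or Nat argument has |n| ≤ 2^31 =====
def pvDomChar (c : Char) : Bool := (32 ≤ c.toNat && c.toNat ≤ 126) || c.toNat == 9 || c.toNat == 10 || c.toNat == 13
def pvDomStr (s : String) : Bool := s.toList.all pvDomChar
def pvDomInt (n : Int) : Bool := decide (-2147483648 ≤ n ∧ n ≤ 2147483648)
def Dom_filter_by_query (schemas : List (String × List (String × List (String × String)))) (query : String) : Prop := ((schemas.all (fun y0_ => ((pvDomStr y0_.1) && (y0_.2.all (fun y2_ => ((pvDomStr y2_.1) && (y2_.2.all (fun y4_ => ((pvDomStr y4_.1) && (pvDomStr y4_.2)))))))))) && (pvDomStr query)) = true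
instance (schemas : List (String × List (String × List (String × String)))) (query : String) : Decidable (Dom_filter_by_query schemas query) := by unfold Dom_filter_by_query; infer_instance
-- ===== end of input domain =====

-- B replaces A's per-name substring scans of the query by one scan of the query:
-- a hash set of all lowered names is built once, every query position is probed
-- with each distinct name length, and tables are kept when a name is in the hit set.

-- ===== PORT A =====
def filter_by_query (schemas : List (String × List (String × List (String × String)))) (query : String) : List String :=
  if query = "" then
    PySem.Dict.keys (PySem.Dict.mk schemas)
  else
    let query_lower := PySem.Str.lower query
    let relevant_tables : List String := schemas.foldl (fun acc ts =>
      if PySem.Str.isIn (PySem.Str.lower ts.1) query_lower then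
        acc ++ [ts.1]
      else
        let columns := PySem.Dict.getD (PySem.Dict.mk ts.2) "columns" []
        if (PySem.Dict.keys (PySem.Dict.mk columns)).any
            (fun col => PySem.Str.isIn (PySem.Str.lower col) query_lower) then
          acc ++ [ts.1]
        else acc) []
    if relevant_tables = [] then PySem.Dict.keys (PySem.Dict.mk schemas) else relevant_tables

-- ===== PORT B =====
def filter_by_query_alt (schemas : List (String × List (String × List (String × String)))) (query : String) : List String :=
  if query = "" then
    PySem.Dict.keys (PySem.Dict.mk schemas)
  else
    let q := PySem.Str.lower query
    let perTable : List (String × List String) := schemas.map (fun ts =>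
      (ts.1, PySem.Str.lower ts.1 ::
        (PySem.Dict.keys (PySem.Dict.mk
          (PySem.Dict.getD (PySem.Dict.mk ts.2) "columns" []))).map PySem.Str.lower))
    let nameSet : PySem.Set String := PySem.Set.ofList (perTable.flatMap (fun p => p.2))
    let lengths : PySem.Set Int := PySem.Set.ofList (nameSet.map PySem.Str.len)
    let matched : PySem.Set String :=
      (PySem.List.pyRange 0 (PySem.Str.len q)).foldl (fun m i =>
        lengths.foldl (fun m L =>
          let sub := PySem.Str.slice q (some i) (some (i + L))
          if PySem.Set.contains nameSet sub then PySem.Set.add m sub else m) m)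
        PySem.Set.empty
    let relevant : List String :=
      (perTable.filter (fun p => p.2.any (fun n => PySem.Set.contains matched n))).map (fun p => p.1)
    if relevant = [] then PySem.Dict.keys (PySem.Dict.mk schemas) else relevant

-- ===== PRECONDITION & SPEC =====
-- Pre_ excludes association lists whose outer table names, or whose keys inside one
-- table's schema dict, contain duplicates: a Python dict cannot hold them (dict(...)
-- silently collapses duplicates, last value winning), so the assoc-list model has no
-- canonical behaviour there.
def Pre_filter_by_query (schemas : List (String × List (String × List (String × String)))) (query : String) : Prop :=
  (schemas.map (fun ts => ts.1)).Nodup ∧ ∀ ts ∈ schemas, (ts.2.map (fun p => p.1)).Nodup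
instance (schemas : List (String × List (String × List (String × String)))) (query : String) : Decidable (Pre_filter_by_query schemas query) := by unfold Pre_filter_by_query; infer_instance

def pvWitness_filter_by_query : (List (String × List (String × List (String × String)))) × String :=
  ([("users", [("columns", [("id", "int"), ("name", "text")])]), ("jobs", [])], "select id from x")

def Spec_filter_by_query (schemas : List (String × List (String × List (String × String)))) (query : String) (out : List String) : Prop := out = filter_by_query_alt schemas query
instance (schemas : List (String × List (String × List (String × String)))) (query : String) (out : List String) : Decidable (Spec_filter_by_query schemas query out) := by unfold Spec_filter_by_query; infer_instance

-- ===== CLAIM (what is proved, stated in full; the proofs are below) =====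
def Claim_equal_filter_by_query : Prop := ∀ (schemas : List (String × List (String × List (String × String)))) (query : String), Dom_filter_by_query schemas query → Pre_filter_by_query schemas query → Spec_filter_by_query schemas query (filter_by_query schemas query)

-- ===== LEMMAS AND PROOFS =====

-- membership in a "conditionally add f x" set-building fold
theorem pv_mem_foldl_addIf {β : Type} (xs : List β) (f : β → String) (p : String → Bool)
    (m : PySem.Set String) (n : String) :
    n ∈ xs.foldl (fun m x => if p (f x) then PySem.Set.add m (f x) else m) m ↔
      n ∈ m ∨ ∃ x ∈ xs, p (f x) ∧ f x = n := by
  induction xs generalizing m with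
  | nil => simp
  | cons a t ih =>
    simp only [List.foldl_cons, ih]
    by_cases h : p (f a) = true
    · rw [if_pos h]
      simp only [PySem.Set.mem_add, List.mem_cons]
      constructor
      · rintro ((hm | rfl) | ⟨x, hx, hpx, rfl⟩)
        · exact Or.inl hm
        · exact Or.inr ⟨a, Or.inl rfl, h, rfl⟩
        · exact Or.inr ⟨x, Or.inr hx, hpx, rfl⟩
      · rintro (hm | ⟨x, (rfl | hx), hpx, rfl⟩)
        · exact Or.inl (Or.inl hm)
        · exact Or.inl (Or.inr rfl)
        · exact Or.inr ⟨x, hx, hpx, rfl⟩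
    · rw [if_neg h]
      simp only [List.mem_cons]
      constructor
      · rintro (hm | ⟨x, hx, hpx, rfl⟩)
        · exact Or.inl hm
        · exact Or.inr ⟨x, Or.inr hx, hpx, rfl⟩
      · rintro (hm | ⟨x, (rfl | hx), hpx, rfl⟩)
        · exact Or.inl hm
        · exact absurd hpx h
        · exact Or.inr ⟨x, hx, hpx, rfl⟩

-- membership in the nested (positions × lengths) set-building fold
theorem pv_mem_foldl_nested (is ls : List Int) (g : Int → Int → String) (p : String → Bool)
    (m : PySem.Set String) (n : String) :
    n ∈ is.foldl (fun m i =>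
        ls.foldl (fun m L => if p (g i L) then PySem.Set.add m (g i L) else m) m) m ↔
      n ∈ m ∨ ∃ i ∈ is, ∃ L ∈ ls, p (g i L) ∧ g i L = n := by
  induction is generalizing m with
  | nil => simp
  | cons a t ih =>
    simp only [List.foldl_cons, ih, pv_mem_foldl_addIf]
    constructor
    · rintro ((hm | ⟨L, hL, hp, hg⟩) | ⟨i, hi, L, hL, hp, hg⟩)
      · exact Or.inl hm
      · exact Or.inr ⟨a, List.mem_cons_self .., L, hL, hp, hg⟩
      · exact Or.inr ⟨i, List.mem_cons_of_mem _ hi, L, hL, hp, hg⟩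
    · rintro (hm | ⟨i, hi, L, hL, hp, hg⟩)
      · exact Or.inl (Or.inl hm)
      · rcases List.mem_cons.mp hi with rfl | hi
        · exact Or.inl (Or.inr ⟨L, hL, hp, hg⟩)
        · exact Or.inr ⟨i, hi, L, hL, hp, hg⟩

-- a q[i:i+L] slice (0 ≤ i, 0 ≤ L) is an infix of q
theorem pv_slice_isInfix (s : String) (i L : Int) (hi : 0 ≤ i) (hL : 0 ≤ L) :
    (PySem.Str.slice s (some i) (some (i + L))).toList <:+: s.toList := by
  lift i to ℕ using hi
  lift L to ℕ using hL
  rw [PySem.Str.toList_slice, PySem.Chars.slice_eq_listSlice]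
  rw [show (i : Int) + (L : Int) = ((i + L : ℕ) : Int) by push_cast; ring]
  rw [PySem.List.slice_natCast]
  exact ((List.take_prefix _ _).isInfix).trans (List.drop_suffix _ _).isInfix

-- if n occurs at position j of s then the slice s[j:j+len(n)] is exactly n
theorem pv_slice_extract (s n : String) (j : ℕ) (hpre : n.toList <+: s.toList.drop j) :
    PySem.Str.slice s (some (j : Int)) (some ((j : Int) + PySem.Str.len n)) = n := by
  have hlen : PySem.Str.len n = (n.toList.length : Int) := PySem.Str.len_eq n
  have : (PySem.Str.slice s (some (j : Int)) (some ((j : Int) + PySem.Str.len n))).toList = n.toList := by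
    rw [PySem.Str.toList_slice, PySem.Chars.slice_eq_listSlice, hlen]
    rw [show (j : Int) + (n.toList.length : Int) = ((j + n.toList.length : ℕ) : Int) by push_cast; ring]
    rw [PySem.List.slice_natCast, Nat.add_sub_cancel_left]
    exact (List.prefix_iff_eq_take.mp hpre).symm
  exact String.toList_inj.mp this

theorem pv_matched_iff (ql : String) (names : List String) (hq : 0 < ql.toList.length) (n : String)
    (hn : n ∈ PySem.Set.ofList names) :
    (n ∈ (PySem.List.pyRange 0 (PySem.Str.len ql)).foldl
        (fun m i => (PySem.Set.ofList ((PySem.Set.ofList names).map PySem.Str.len)).foldl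
          (fun m L => if PySem.Set.contains (PySem.Set.ofList names)
                (PySem.Str.slice ql (some i) (some (i + L))) then
              PySem.Set.add m (PySem.Str.slice ql (some i) (some (i + L))) else m) m)
        PySem.Set.empty) ↔
      PySem.Str.isIn n ql = true := by
  rw [pv_mem_foldl_nested (g := fun i L => PySem.Str.slice ql (some i) (some (i + L)))]
  constructor
  · rintro (hm | ⟨i, hi, L, hL, hp, rfl⟩)
    · simp [PySem.Set.empty] at hm
    · obtain ⟨hi0, _⟩ := PySem.List.mem_pyRange_one.mp hi
      have hL0 : 0 ≤ L := by
        have := (PySem.Set.mem_ofList _ _).mp hL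
        obtain ⟨n', _, rfl⟩ := List.mem_map.mp this
        rw [PySem.Str.len_eq]; positivity
      exact (PySem.Str.isIn_iff_infix _ _).mpr (pv_slice_isInfix ql i L hi0 hL0)
  · intro hin
    have hinf : ∃ j, n.toList <+: ql.toList.drop j := by
      rw [PySem.Chars.exists_prefix_drop_iff_isIn]
      simpa using hin
    obtain ⟨j, hj⟩ := hinf
    have hLmem : PySem.Str.len n ∈ PySem.Set.ofList ((PySem.Set.ofList names).map PySem.Str.len) :=
      (PySem.Set.mem_ofList _ _).mpr (List.mem_map.mpr ⟨n, hn, rfl⟩)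
    by_cases hnil : n.toList = []
    · refine Or.inr ⟨0, ?_, PySem.Str.len n, hLmem, ?_⟩
      · exact PySem.List.mem_pyRange_one.mpr ⟨le_refl _, by rw [PySem.Str.len_eq]; exact_mod_cast hq⟩
      · have h0 : n.toList <+: ql.toList.drop 0 := by simp [hnil]
        have := pv_slice_extract ql n 0 h0
        simp only [Nat.cast_zero] at this
        rw [this]
        exact ⟨(PySem.Set.contains_iff _ _).mpr hn, rfl⟩
    · have hjlt : j < ql.toList.length := by
        have h1 := hj.length_le
        rw [List.length_drop] at h1
        have h2 : 0 < n.toList.length := List.length_pos_of_ne_nil hnil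
        omega
      refine Or.inr ⟨(j : Int), ?_, PySem.Str.len n, hLmem, ?_⟩
      · exact PySem.List.mem_pyRange_one.mpr ⟨by positivity, by rw [PySem.Str.len_eq]; exact_mod_cast hjlt⟩
      · have := pv_slice_extract ql n j hj
        rw [this]
        exact ⟨(PySem.Set.contains_iff _ _).mpr hn, rfl⟩

theorem pv_core (schemas : List (String × List (String × List (String × String)))) (ql : String)
    (hql : 0 < ql.toList.length) :
    schemas.foldl
      (fun acc ts =>
        if PySem.Str.isIn (PySem.Str.lower ts.1) ql = true then acc ++ [ts.1]
        else if (PySem.Dict.keys (PySem.Dict.mk (PySem.Dict.getD (PySem.Dict.mk ts.2) "columns" []))).any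
              (fun col => PySem.Str.isIn (PySem.Str.lower col) ql) = true then acc ++ [ts.1]
        else acc) [] =
    ((schemas.map (fun ts => (ts.1, PySem.Str.lower ts.1 ::
          (PySem.Dict.keys (PySem.Dict.mk (PySem.Dict.getD (PySem.Dict.mk ts.2) "columns" []))).map PySem.Str.lower))).filter
        (fun p => p.2.any (fun n => PySem.Set.contains
          ((PySem.List.pyRange 0 (PySem.Str.len ql)).foldl
            (fun m i => (PySem.Set.ofList ((PySem.Set.ofList
                ((schemas.map (fun ts => (ts.1, PySem.Str.lower ts.1 ::
                  (PySem.Dict.keys (PySem.Dict.mk (PySem.Dict.getD (PySem.Dict.mk ts.2) "columns" []))).map PySem.Str.lower))).flatMap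
                  (fun p => p.2))).map PySem.Str.len)).foldl
              (fun m L => if PySem.Set.contains (PySem.Set.ofList
                    ((schemas.map (fun ts => (ts.1, PySem.Str.lower ts.1 ::
                      (PySem.Dict.keys (PySem.Dict.mk (PySem.Dict.getD (PySem.Dict.mk ts.2) "columns" []))).map PySem.Str.lower))).flatMap
                      (fun p => p.2)))
                    (PySem.Str.slice ql (some i) (some (i + L))) then
                  PySem.Set.add m (PySem.Str.slice ql (some i) (some (i + L))) else m) m)
            PySem.Set.empty) n))).map (fun p => p.1) := by
  set g : (String × List (String × List (String × String))) → String × List String :=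
    fun ts => (ts.1, PySem.Str.lower ts.1 ::
      (PySem.Dict.keys (PySem.Dict.mk (PySem.Dict.getD (PySem.Dict.mk ts.2) "columns" []))).map PySem.Str.lower) with hg
  set NAMES : List String := (schemas.map g).flatMap (fun p => p.2) with hN
  set MATCHED : PySem.Set String :=
    (PySem.List.pyRange 0 (PySem.Str.len ql)).foldl
      (fun m i => (PySem.Set.ofList ((PySem.Set.ofList NAMES).map PySem.Str.len)).foldl
        (fun m L => if PySem.Set.contains (PySem.Set.ofList NAMES)
              (PySem.Str.slice ql (some i) (some (i + L))) then
            PySem.Set.add m (PySem.Str.slice ql (some i) (some (i + L))) else m) m)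
      PySem.Set.empty with hM
  have hmat : ∀ n, n ∈ PySem.Set.ofList NAMES → PySem.Set.contains MATCHED n = PySem.Str.isIn n ql := by
    intro n hn
    have hiff := (PySem.Set.contains_iff MATCHED n).trans (hM ▸ pv_matched_iff ql NAMES hql n hn)
    cases hb : PySem.Str.isIn n ql with
    | true => exact hiff.mpr hb
    | false =>
      cases hc : PySem.Set.contains MATCHED n with
      | true => exact absurd (hiff.mp hc) (fun h => by rw [h] at hb; exact Bool.noConfusion hb)
      | false => rfl
  rw [PySem.List.foldl_congr_mem schemas
    (fun acc ts =>
      if PySem.Str.isIn (PySem.Str.lower ts.1) ql = true then acc ++ [ts.1]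
      else if (PySem.Dict.keys (PySem.Dict.mk (PySem.Dict.getD (PySem.Dict.mk ts.2) "columns" []))).any
            (fun col => PySem.Str.isIn (PySem.Str.lower col) ql) = true then acc ++ [ts.1]
      else acc)
    (fun acc ts =>
    if (PySem.Str.isIn (PySem.Str.lower ts.1) ql ||
        (PySem.Dict.keys (PySem.Dict.mk (PySem.Dict.getD (PySem.Dict.mk ts.2) "columns" []))).any
          (fun col => PySem.Str.isIn (PySem.Str.lower col) ql)) = true then acc ++ [ts.1] else acc) []
    (by intro acc ts _
        simp only []
        by_cases h1 : PySem.Str.isIn (PySem.Str.lower ts.1) ql = true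
        · rw [if_pos h1, h1]; simp
        · rw [if_neg h1]
          rw [Bool.not_eq_true] at h1
          rw [h1, Bool.false_or])]
  rw [PySem.List.foldl_append_if, List.nil_append]
  rw [List.filter_map, List.map_map]
  have hcomp : ((fun (p : String × List String) => p.1) ∘ g) = fun ts => ts.1 := rfl
  rw [hcomp]
  refine congrArg _ (List.filter_congr ?_)
  intro ts hts
  have hmemg : g ts ∈ schemas.map g := List.mem_map.mpr ⟨ts, hts, rfl⟩
  have h1 : PySem.Str.lower ts.1 ∈ PySem.Set.ofList NAMES := by
    refine (PySem.Set.mem_ofList _ _).mpr (List.mem_flatMap.mpr ⟨g ts, hmemg, ?_⟩)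
    exact List.mem_cons_self ..
  simp only [Function.comp_def, hg, List.any_cons, List.any_map]
  rw [hmat _ h1]
  have h2 : ∀ c ∈ (PySem.Dict.keys (PySem.Dict.mk (PySem.Dict.getD (PySem.Dict.mk ts.2) "columns" []))),
      PySem.Set.contains MATCHED (PySem.Str.lower c) = PySem.Str.isIn (PySem.Str.lower c) ql := by
    intro c hc
    refine hmat _ ((PySem.Set.mem_ofList _ _).mpr (List.mem_flatMap.mpr ⟨g ts, hmemg, ?_⟩))
    exact List.mem_cons_of_mem _ (List.mem_map_of_mem hc)
  rw [PySem.List.any_congr_mem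
    (f := fun c => PySem.Set.contains MATCHED (PySem.Str.lower c))
    (g := fun col => PySem.Str.isIn (PySem.Str.lower col) ql) h2]

theorem pv_AB_eq (schemas : List (String × List (String × List (String × String)))) (query : String) :
    filter_by_query schemas query = filter_by_query_alt schemas query := by
  by_cases hq : query = ""
  · unfold filter_by_query filter_by_query_alt
    rw [if_pos hq, if_pos hq]
  · unfold filter_by_query filter_by_query_alt
    rw [if_neg hq, if_neg hq]
    refine congrArg (fun r => if r = [] then PySem.Dict.keys (PySem.Dict.mk schemas) else r) ?_
    have hq' : 0 < (PySem.Str.lower query).toList.length := by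
      rw [PySem.Str.toList_lower]
      have hne : query.toList ≠ [] := fun h => hq (String.toList_inj.mp (by rw [h]; rfl))
      have hl : PySem.Chars.lower query.toList = List.map PySem.Chars.lowerChar query.toList := rfl
      rw [hl, List.length_map]
      exact List.length_pos_of_ne_nil hne
    exact pv_core schemas (PySem.Str.lower query) hq'

-- ===== VERDICT (by name: the statement is the Claim_ definition above) =====
theorem filter_by_query_spec : Claim_equal_filter_by_query := by
  intro schemas query _ _
  unfold Spec_filter_by_query
  exact pv_AB_eq schemas query
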